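-- pv_equiv track=rewrite | github.com/RajatSethi2001/DataAnalysis | funny.py | numberify
-- ===== SOURCE A (Python) =====
-- def numberify(value):
--     sum = 0
--     result = ""
--     addition = ""
--     word = value.upper()
--     for c in range(len(word)):
--         ascii = ord(word[c]) - ord('A') + 1
--         sum += ascii
--         if (c < len(word) - 1):
--             result = f"{result}{word[c]}-"
--             addition = f"{addition}{ascii}+"
--         else:
--             result = f"{result}{word[c]}: "
--             addition = f"{addition}{ascii} = {sum}%"
--     return [word, sum, f"{result}{addition}"]
-- ===== SOURCE B (Python) =====
-- def numberify(value):
--     word = value.upper()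
--     values = [ord(c) - 64 for c in word]
--     total = sum(values)
--     if word:
--         combined = "-".join(word) + ": " + "+".join(str(v) for v in values) + f" = {total}%"
--     else:
--         combined = ""
--     return [word, total, combined]
-- ===== Notes on version B (the rewrite author's own statement) =====
-- stated objective: simpler
-- what changed: Replaces A's single loop with an in-loop last-character branch and incremental f-string concatenation by a value list + sum() and join-based assembly of the breakdown string (empty word guarded to keep the empty result).
import Mathlib
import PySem

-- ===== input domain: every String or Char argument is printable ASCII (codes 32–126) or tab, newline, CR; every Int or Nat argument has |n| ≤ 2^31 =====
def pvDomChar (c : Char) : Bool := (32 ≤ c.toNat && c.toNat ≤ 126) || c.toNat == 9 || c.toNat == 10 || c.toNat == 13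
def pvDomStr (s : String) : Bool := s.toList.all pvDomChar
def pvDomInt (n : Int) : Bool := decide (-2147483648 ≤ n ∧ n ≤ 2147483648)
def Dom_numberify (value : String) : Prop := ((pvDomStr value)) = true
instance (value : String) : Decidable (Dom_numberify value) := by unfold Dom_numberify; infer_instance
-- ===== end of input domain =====

-- B drops A's in-loop last-character branch for a value-list pass plus join-based assembly (simpler).

-- ===== PORT A =====
-- 'for c in range(len(word))' iterated as a fold over the (index, char) pairs; the branch
-- and both f-string accumulations are kept step for step (state = (sum, result, addition)).
def numberify (value : String) : String × Int × String :=
  let word := PySem.Str.upper value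
  let L := word.toList
  let st :=
    (PySem.List.enumerate L 0).foldl
      (fun (st : Int × List Char × List Char) (p : Int × Char) =>
        let ascii : Int := (p.2.toNat : Int) - ('A'.toNat : Int) + 1
        let sum := st.1 + ascii
        if p.1 < (L.length : Int) - 1 then
          (sum, st.2.1 ++ [p.2, '-'], st.2.2 ++ PySem.Int.toChars ascii ++ ['+'])
        else
          (sum, st.2.1 ++ [p.2, ':', ' '],
           st.2.2 ++ PySem.Int.toChars ascii ++ [' ', '=', ' '] ++ PySem.Int.toChars sum ++ ['%']))
      (0, [], [])
  (word, st.1, String.ofList (st.2.1 ++ st.2.2))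

-- ===== PORT B =====
def numberify_alt (value : String) : String × Int × String :=
  let word := PySem.Str.upper value
  let L := word.toList
  let values := L.map (fun c => (c.toNat : Int) - 64)
  let total := values.foldl (fun a v => a + v) 0
  let combined : List Char :=
    if L = [] then []
    else PySem.Chars.join ['-'] (L.map (fun c => [c])) ++ [':', ' ']
         ++ PySem.Chars.join ['+'] (values.map PySem.Int.toChars)
         ++ [' ', '=', ' '] ++ PySem.Int.toChars total ++ ['%']
  (word, total, String.ofList combined)

-- ===== PRECONDITION & SPEC =====
def Spec_numberify (value : String) (out : String × Int × String) : Prop := out = numberify_alt value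
instance (value : String) (out : String × Int × String) : Decidable (Spec_numberify value out) := by unfold Spec_numberify; infer_instance

-- ===== CLAIM (what is proved, stated in full; the proofs are below) =====
def Claim_equal_numberify : Prop := ∀ (value : String), Dom_numberify value → Spec_numberify value (numberify value)

-- ===== LEMMAS AND PROOFS =====

def nv (c : Char) : Int := (c.toNat : Int) - ('A'.toNat : Int) + 1

theorem nv_eq (c : Char) : ((c.toNat : Int) - 64) = nv c := by
  simp [nv]
  omega

-- direct recursion equivalent to A's indexed loop (the 'c < len-1' branch becomes 'tail nonempty')
def loopA : List Char → Int → List Char → List Char → Int × List Char × List Char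
  | [], s, r, a => (s, r, a)
  | x :: xs, s, r, a =>
    if xs = [] then
      (s + nv x, r ++ [x, ':', ' '],
       a ++ PySem.Int.toChars (nv x) ++ [' ', '=', ' '] ++ PySem.Int.toChars (s + nv x) ++ ['%'])
    else loopA xs (s + nv x) (r ++ [x, '-']) (a ++ PySem.Int.toChars (nv x) ++ ['+'])

theorem fold_eq (n : Int) (xs : List Char) : ∀ (k s : Int) (r a : List Char),
    k + xs.length = n →
    (PySem.List.enumerate xs k).foldl
      (fun (st : Int × List Char × List Char) (p : Int × Char) =>
        let ascii : Int := (p.2.toNat : Int) - ('A'.toNat : Int) + 1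
        let sum := st.1 + ascii
        if p.1 < n - 1 then
          (sum, st.2.1 ++ [p.2, '-'], st.2.2 ++ PySem.Int.toChars ascii ++ ['+'])
        else
          (sum, st.2.1 ++ [p.2, ':', ' '],
           st.2.2 ++ PySem.Int.toChars ascii ++ [' ', '=', ' '] ++ PySem.Int.toChars sum ++ ['%']))
      (s, r, a) = loopA xs s r a := by
  induction xs with
  | nil => intro k s r a h; simp [PySem.List.enumerate_nil, loopA]
  | cons x xs ih =>
    intro k s r a h
    rw [PySem.List.enumerate_cons, List.foldl_cons]
    simp only [List.length_cons] at h
    by_cases hxs : xs = []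
    · subst hxs
      have hk : ¬ (k < n - 1) := by simp at h; omega
      simp [PySem.List.enumerate_nil, loopA, hk, nv]
    · have hk : k < n - 1 := by
        have : 1 ≤ (xs.length : Int) := by
          have := List.length_pos_iff.mpr hxs
          omega
        push_cast at h
        omega
      simp only [hk, if_pos]
      rw [loopA]
      simp only [hxs, nv]
      exact ih (k + 1) _ _ _ (by push_cast at h ⊢; omega)

theorem loopA_spec (xs : List Char) : ∀ (x : Char) (s : Int) (r a : List Char),
    loopA (x :: xs) s r a =
      ((x :: xs).foldl (fun acc c => acc + nv c) s,
       r ++ PySem.Chars.join ['-'] ((x :: xs).map (fun c => [c])) ++ [':', ' '],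
       a ++ PySem.Chars.join ['+'] ((x :: xs).map (fun c => PySem.Int.toChars (nv c)))
         ++ [' ', '=', ' ']
         ++ PySem.Int.toChars ((x :: xs).foldl (fun acc c => acc + nv c) s) ++ ['%']) := by
  induction xs with
  | nil =>
    intro x s r a
    simp [loopA, PySem.Chars.join_singleton]
  | cons y ys ih =>
    intro x s r a
    rw [loopA]
    simp only [List.map_cons, reduceCtorEq, ite_false]
    rw [ih y (s + nv x)]
    rw [PySem.Chars.join_cons_cons, PySem.Chars.join_cons_cons]
    simp [List.foldl_cons, List.append_assoc]

-- ===== VERDICT (by name: the statement is the Claim_ definition above) =====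
theorem numberify_spec : Claim_equal_numberify := by
  intro value _
  unfold Spec_numberify
  simp only [numberify, numberify_alt]
  cases hL : (PySem.Str.upper value).toList with
  | nil => simp [PySem.List.enumerate_nil]
  | cons x xs =>
    rw [fold_eq ((x :: xs).length : Int) (x :: xs) 0 0 [] [] (by simp)]
    rw [loopA_spec]
    simp only [List.foldl_map, nv_eq, reduceCtorEq, ite_false, List.map_map]
    simp [Function.comp_def]
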